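-- pv_equiv track=rewrite | github.com/Hmdgt2/tol | backup_biblioteca_original_20251018_133529/analise_padroes.py | score_prime
-- ===== SOURCE A (Python) =====
-- from typing import List, Tuple
--
-- def score_prime(lst: List[int]) -> float:
--     """Pontua a lista com base na presença de números primos."""
--     def is_prime(x: int) -> bool:
--         if x < 2:
--             return False
--         for i in range(2, int(x**0.5) + 1):
--             if x % i == 0:
--                 return False
--         return True
--     return sum(2 if is_prime(x) else 0 for x in lst)
-- ===== SOURCE B (Python) =====
-- def score_prime(lst):
--     """Pontua a lista com base na presença de números primos."""
--     if not lst: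
--         return 0
--     m = max(lst)
--     if m < 2:
--         return 0
--     r = int(m ** 0.5)
--     sieve = [x >= 2 for x in range(r + 1)]
--     i = 2
--     while i * i <= r:
--         j = i * i
--         while j <= r:
--             sieve[j] = False
--             j += i
--         i += 1
--     primes = [p for p in range(r + 1) if sieve[p]]
--     total = 0
--     for x in lst:
--         if x >= 2:
--             ok = True
--             for p in primes:
--                 if p * p <= x and x % p == 0:
--                     ok = False
--                     break
--             if ok:
--                 total += 2
--     return total
-- ===== Notes on version B (the rewrite author's own statement) =====
-- stated objective: faster
-- what changed: B replaces A's per-element trial division over all integers 2..sqrt(x) by a sieve of Eratosthenes built once up to isqrt(max(lst)), then tests each listed value against that precomputed prime table in one counting pass.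
import Mathlib
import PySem

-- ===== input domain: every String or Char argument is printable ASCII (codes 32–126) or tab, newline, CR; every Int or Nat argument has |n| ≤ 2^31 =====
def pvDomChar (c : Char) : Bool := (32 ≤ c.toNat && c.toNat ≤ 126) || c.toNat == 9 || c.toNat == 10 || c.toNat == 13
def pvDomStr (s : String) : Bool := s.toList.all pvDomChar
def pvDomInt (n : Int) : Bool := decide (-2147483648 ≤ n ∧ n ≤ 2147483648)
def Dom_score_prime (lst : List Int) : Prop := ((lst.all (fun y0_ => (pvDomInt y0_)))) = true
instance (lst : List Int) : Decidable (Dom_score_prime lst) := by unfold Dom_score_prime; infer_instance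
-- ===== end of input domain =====

-- B replaces A's per-element trial division over all integers 2..sqrt(x) by a sieve of
-- Eratosthenes built once up to isqrt(max(lst)) and one counting pass testing each value
-- against that prime table (measured faster in a timing run).

-- ===== PORT A =====
-- Python's int(x**0.5) on 0 ≤ x ≤ 2^31: the double sqrt is exact enough there that
-- int(x**0.5) = Nat.sqrt x.toNat (perfect squares < 2^53 are exact; for non-squares the
-- relative error 2^-53·√x is far below the distance 1/(2√x) to the nearest integer).
def trialLoopA (x : Int) : List Int → Bool
  | [] => true
  | i :: rest => if PySem.Int.mod x i == 0 then false else trialLoopA x rest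

def isPrimeA (x : Int) : Bool :=
  if x < 2 then false
  else trialLoopA x (PySem.List.pyRange 2 ((Nat.sqrt x.toNat : Int) + 1) 1)

def score_prime (lst : List Int) : Int :=
  (lst.map (fun x => if isPrimeA x then (2 : Int) else 0)).sum

-- ===== PORT B =====
-- inner 'while j <= m: sieve[j] = False; j += i' (1 ≤ i is the loop's own invariant,
-- carried as a hypothesis only for termination; indices stay in range, so setIfInBounds is exact)
def markLoop (m i : Int) (hi : 1 ≤ i) (j : Int) (s : Array Bool) : Array Bool :=
  if j ≤ m then markLoop m i hi (j + i) (s.setIfInBounds j.toNat false) else s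
termination_by (m + 1 - j).toNat
decreasing_by omega

-- outer 'while i * i <= r: …; i += 1' (2 ≤ i carried for termination)
def sieveLoop (m i : Int) (hi : 2 ≤ i) (s : Array Bool) : Array Bool :=
  if h : i * i ≤ m then
    sieveLoop m (i + 1) (by omega) (markLoop m i (by omega) (i * i) s)
  else s
termination_by (m + 1 - i).toNat
decreasing_by
  have : i ≤ i * i := by nlinarith
  omega

-- 'for p in primes: if p * p <= x and x % p == 0: ok = False; break' (ok read after the loop)
def innerOk (x : Int) : List Int → Bool
  | [] => true
  | p :: rest =>
      if decide (p * p ≤ x) && (PySem.Int.mod x p == 0) then false else innerOk x rest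

def score_prime_alt (lst : List Int) : Int :=
  if lst = [] then 0
  else
    -- Python max(lst) on a nonempty list: max? is some, getD never takes the default
    let m := (PySem.List.max? lst (fun y => y)).getD 0
    if m < 2 then 0
    else
      -- r = int(m ** 0.5): exact as Nat.sqrt on this domain (same argument as port A's comment)
      let r : Int := (Nat.sqrt m.toNat : Int)
      let sieve := sieveLoop r 2 (by omega)
        (((PySem.List.pyRange 0 (r + 1) 1).map (fun y => decide (2 ≤ y))).toArray)
      -- 'primes = [p for p in range(r + 1) if sieve[p]]' (index p ≤ r is in range, getD is exact)
      let primes := (PySem.List.pyRange 0 (r + 1) 1).filter (fun p => sieve.getD p.toNat false)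
      lst.foldl
        (fun t x => if 2 ≤ x then (if innerOk x primes then t + 2 else t) else t) 0

-- ===== PRECONDITION & SPEC =====
def Spec_score_prime (lst : List Int) (out : Int) : Prop := out = score_prime_alt lst
instance (lst : List Int) (out : Int) : Decidable (Spec_score_prime lst out) := by unfold Spec_score_prime; infer_instance

-- ===== CLAIM (what is proved, stated in full; the proofs are below) =====
def Claim_equal_score_prime : Prop := ∀ (lst : List Int), Dom_score_prime lst → Spec_score_prime lst (score_prime lst)

-- ===== LEMMAS AND PROOFS =====

theorem trialLoopA_eq_true_iff (x : Int) (l : List Int) :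
    trialLoopA x l = true ↔ ∀ i ∈ l, ¬ (i ∣ x) := by
  induction l with
  | nil => simp [trialLoopA]
  | cons i rest ih =>
      show (if PySem.Int.mod x i == 0 then false else trialLoopA x rest) = true ↔ _
      by_cases h : PySem.Int.mod x i = 0
      · rw [if_pos (by rw [h]; decide)]
        simp only [Bool.false_eq_true, false_iff]
        intro hall
        exact hall i (List.mem_cons_self) ((PySem.Int.mod_eq_zero_iff_dvd x i).mp h)
      · have hnd : ¬ (i ∣ x) := fun hd => h ((PySem.Int.mod_eq_zero_iff_dvd x i).mpr hd)
        rw [if_neg (by simp only [beq_iff_eq]; exact h), ih]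
        constructor
        · intro hall j hj
          rcases List.mem_cons.mp hj with rfl | hj
          · exact hnd
          · exact hall j hj
        · intro hall j hj
          exact hall j (List.mem_cons_of_mem _ hj)

theorem isPrimeA_eq_true_iff (x : Int) (hx : 2 ≤ x) :
    isPrimeA x = true ↔ Nat.Prime x.toNat := by
  have hx0 : ¬ x < 2 := by omega
  rw [isPrimeA, if_neg hx0, trialLoopA_eq_true_iff]
  constructor
  · intro hall
    rw [Nat.prime_def_le_sqrt]
    refine ⟨by omega, fun m hm2 hms hdvd => ?_⟩
    have hmem : (m : Int) ∈ PySem.List.pyRange 2 ((Nat.sqrt x.toNat : Int) + 1) 1 := by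
      rw [PySem.List.mem_pyRange_one]
      refine ⟨by exact_mod_cast hm2, by exact_mod_cast Nat.lt_succ_of_le hms⟩
    have hmx : (m : Int) ∣ x := by
      have h1 : (m : Int) ∣ (x.toNat : Int) := Int.natCast_dvd_natCast.mpr hdvd
      rwa [Int.toNat_of_nonneg (show (0:Int) ≤ x by omega)] at h1
    exact hall (m : Int) hmem hmx
  · intro hp i hi hdvd
    rw [PySem.List.mem_pyRange_one] at hi
    have hi2 : 2 ≤ i.toNat := by omega
    have his : i.toNat ≤ Nat.sqrt x.toNat := by omega
    have hdn : i.toNat ∣ x.toNat := by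
      have h1 : ((i.toNat : Int)) ∣ ((x.toNat : Int)) := by
        rw [Int.toNat_of_nonneg (show (0:Int) ≤ i by omega),
            Int.toNat_of_nonneg (show (0:Int) ≤ x by omega)]
        exact hdvd
      exact_mod_cast h1
    exact (Nat.prime_def_le_sqrt.mp hp).2 i.toNat hi2 his hdn

theorem size_markLoop (m i : Int) (hi : 1 ≤ i) (j : Int) (s : Array Bool) :
    (markLoop m i hi j s).size = s.size := by
  induction j, s using markLoop.induct (m := m) (i := i) hi with
  | case1 j s h ih =>
      rw [markLoop, if_pos h, ih, Array.size_setIfInBounds]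
  | case2 j s h =>
      rw [markLoop, if_neg h]

theorem markLoop_getD (m i : Int) (hi : 1 ≤ i) (k : Nat) (hk : (k : Int) ≤ m) :
    ∀ (j : Int) (s : Array Bool), 0 ≤ j → m < (s.size : Int) →
    ((markLoop m i hi j s).getD k false = true ↔
      s.getD k false = true ∧ ¬ ∃ t : Nat, (k : Int) = j + t * i) := by
  intro j s
  induction j, s using markLoop.induct (m := m) (i := i) hi with
  | case1 j s h ih =>
      intro hj hsz
      rw [markLoop, if_pos h]
      rw [ih (by omega) (by rw [Array.size_setIfInBounds]; exact hsz)]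
      have hset : (s.setIfInBounds j.toNat false).getD k false
          = if j.toNat = k then false else s.getD k false := by
        by_cases he : j.toNat = k
        · subst he
          have hlt : j.toNat < s.size := by omega
          simp [Array.getD, hlt]
        · by_cases hkl : k < s.size
          · simp [Array.getD, hkl, he]
          · simp [Array.getD, hkl]
      rw [hset]
      by_cases he : j.toNat = k
      · have hkj : (k : Int) = j := by omega
        simp only [he]
        constructor
        · intro hfalse; exact absurd hfalse (by simp)
        · rintro ⟨-, hno⟩
          exact absurd ⟨0, by omega⟩ hno
      · rw [if_neg he]
        have hkj : (k : Int) ≠ j := by omega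
        constructor
        · rintro ⟨hs, hno⟩
          refine ⟨hs, ?_⟩
          rintro ⟨t, ht⟩
          cases t with
          | zero => exact hkj (by push_cast at ht; omega)
          | succ t' =>
              refine hno ⟨t', ?_⟩
              push_cast at ht ⊢
              linarith [ht]
        · rintro ⟨hs, hno⟩
          refine ⟨hs, ?_⟩
          rintro ⟨t, ht⟩
          refine hno ⟨t + 1, ?_⟩
          push_cast at ht ⊢
          linarith [ht]
  | case2 j s h =>
      intro hj hsz
      rw [markLoop, if_neg h]
      constructor
      · intro hs
        refine ⟨hs, ?_⟩
        rintro ⟨t, ht⟩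
        have h0 : (0 : Int) ≤ (t : Int) * i := by positivity
        omega
      · exact fun hp => hp.1

theorem sieveLoop_getD (m : Int) (k : Nat) (hk : (k : Int) ≤ m) :
    ∀ (i : Int) (hi : 2 ≤ i) (s : Array Bool), m < (s.size : Int) →
    ((sieveLoop m i hi s).getD k false = true ↔
      s.getD k false = true ∧
        ∀ d : Int, i ≤ d → d * d ≤ m → ¬ ∃ t : Nat, (k : Int) = d * d + t * d) := by
  intro i hi s
  induction i, hi, s using sieveLoop.induct (m := m) with
  | case1 i hi s h ih =>
      intro hsz
      rw [sieveLoop, dif_pos h]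
      rw [ih (by rw [size_markLoop]; exact hsz)]
      rw [markLoop_getD m i (by omega) k hk (i * i) s (by positivity) hsz]
      constructor
      · rintro ⟨⟨hs, hni⟩, hall⟩
        refine ⟨hs, fun d hd hdm => ?_⟩
        rcases eq_or_lt_of_le hd with rfl | hlt
        · exact hni
        · exact hall d (by omega) hdm
      · rintro ⟨hs, hall⟩
        exact ⟨⟨hs, hall i le_rfl h⟩, fun d hd hdm => hall d (by omega) hdm⟩
  | case2 i hi s h =>
      intro hsz
      rw [sieveLoop, dif_neg h]
      constructor
      · intro hs
        refine ⟨hs, fun d hd hdm hex => ?_⟩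
        have : i * i ≤ d * d := by nlinarith
        omega
      · exact fun hp => hp.1

-- divisibility form of 'k is hit by the arithmetic progression d*d, d*d+d, …'
theorem hit_iff_dvd (k : Nat) (d : Int) (hd : 2 ≤ d) :
    (∃ t : Nat, (k : Int) = d * d + t * d) ↔ d ∣ (k : Int) ∧ d * d ≤ (k : Int) := by
  constructor
  · rintro ⟨t, ht⟩
    constructor
    · exact ⟨d + t, by rw [ht]; ring⟩
    · have h0 : (0 : Int) ≤ (t : Int) * d := by positivity
      omega
  · rintro ⟨⟨c, hc⟩, hsq⟩
    have hk0 : (0 : Int) ≤ k := by positivity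
    have hcd : d ≤ c := by nlinarith
    refine ⟨(c - d).toNat, ?_⟩
    rw [hc]
    have he : ((c - d).toNat : Int) = c - d := Int.toNat_of_nonneg (by omega)
    rw [he]; ring

-- the sieve entry at 0 ≤ x ≤ r is exactly '2 ≤ x and x is prime'
theorem sieve_entry (r x : Int) (hr : 0 ≤ r) (hx0 : 0 ≤ x) (hxr : x ≤ r) :
    ((sieveLoop r 2 (by omega)
        (((PySem.List.pyRange 0 (r + 1) 1).map (fun y => decide (2 ≤ y))).toArray)).getD
        x.toNat false = true) ↔ (2 ≤ x ∧ Nat.Prime x.toNat) := by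
  set l : List Bool := (PySem.List.pyRange 0 (r + 1) 1).map (fun y => decide (2 ≤ y)) with hl
  have hxk : ((x.toNat : Int)) = x := Int.toNat_of_nonneg hx0
  have hllen : l.length = (r + 1).toNat := by
    rw [hl, List.length_map, PySem.List.length_pyRange_one]
    omega
  have hxl : x.toNat < l.length := by rw [hllen]; omega
  have hxlt : x.toNat < l.toArray.size := by rw [List.size_toArray]; exact hxl
  have hs0v : l.toArray.getD x.toNat false = decide (2 ≤ x) := by
    have hcast : (((r + 1).toNat : Int)) = r + 1 := by omega
    have hq : ((PySem.List.pyRange 0 (((r + 1).toNat : Int)) 1).map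
        (fun y => decide (2 ≤ y) : Int → Bool))[x.toNat]? = some (decide (2 ≤ (x.toNat : Int))) :=
      PySem.List.getElem?_map_pyRange_zero _ (r + 1).toNat x.toNat (by omega)
    rw [hcast] at hq
    rw [← hl] at hq
    have hv : l[x.toNat]'hxl = decide (2 ≤ (x.toNat : Int)) := by
      have := List.getElem?_eq_getElem (l := l) (i := x.toNat) hxl
      rw [this] at hq
      exact Option.some.inj hq
    simp [Array.getD, hxl, hv, hxk]
  have hsz : r < (l.toArray.size : Int) := by
    rw [List.size_toArray, hllen]; omega
  rw [sieveLoop_getD r x.toNat (by omega) 2 (by omega) l.toArray hsz]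
  rw [hs0v]
  by_cases hx2 : 2 ≤ x
  · simp only [hx2, decide_true, true_and]
    constructor
    · intro hall
      by_contra hnp
      have hn2 : 2 ≤ x.toNat := by omega
      set p := x.toNat.minFac with hpdef
      have hp : p.Prime := Nat.minFac_prime (by omega)
      have hpd : p ∣ x.toNat := Nat.minFac_dvd _
      have hsq : p ^ 2 ≤ x.toNat := Nat.minFac_sq_le_self (by omega) hnp
      have hpdx : (p : Int) ∣ x := by
        have h1 : ((p : Int)) ∣ ((x.toNat : Int)) := Int.natCast_dvd_natCast.mpr hpd
        rwa [hxk] at h1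
      have hc := hall (p : Int) (by exact_mod_cast hp.two_le)
        (by rw [show ((p:Int)*(p:Int)) = ((p^2 : Nat) : Int) by push_cast; ring]; omega)
      rw [hit_iff_dvd x.toNat (p : Int) (by exact_mod_cast hp.two_le)] at hc
      refine hc ⟨by rwa [hxk], ?_⟩
      rw [hxk]
      rw [show ((p:Int)*(p:Int)) = ((p^2 : Nat) : Int) by push_cast; ring]
      omega
    · intro hp d hd hdr hex
      rw [hit_iff_dvd x.toNat d (by omega)] at hex
      obtain ⟨hdvd, hdsq⟩ := hex
      rw [hxk] at hdvd hdsq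
      have hdn : d.toNat ∣ x.toNat := by
        have h1 : ((d.toNat : Int)) ∣ ((x.toNat : Int)) := by
          rw [Int.toNat_of_nonneg (by omega : (0:Int) ≤ d), hxk]
          exact hdvd
        exact_mod_cast h1
      rcases hp.eq_one_or_self_of_dvd d.toNat hdn with h1 | h2
      · omega
      · have hdx : d = x := by omega
        nlinarith
  · simp [hx2]

-- membership in the filtered prime table
theorem mem_primes (r p : Int) (hr : 0 ≤ r) :
    (p ∈ (PySem.List.pyRange 0 (r + 1) 1).filter
        (fun q => (sieveLoop r 2 (by omega)
          (((PySem.List.pyRange 0 (r + 1) 1).map (fun y => decide (2 ≤ y))).toArray)).getD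
          q.toNat false)) ↔ (2 ≤ p ∧ p ≤ r ∧ Nat.Prime p.toNat) := by
  rw [List.mem_filter, PySem.List.mem_pyRange_one]
  constructor
  · rintro ⟨⟨h0, h1⟩, hs⟩
    have h := (sieve_entry r p hr h0 (by omega)).mp hs
    exact ⟨h.1, by omega, h.2⟩
  · rintro ⟨h2, hr', hp⟩
    exact ⟨⟨by omega, by omega⟩, (sieve_entry r p hr (by omega) hr').mpr ⟨h2, hp⟩⟩

theorem innerOk_eq_true_iff (x : Int) (l : List Int) :
    innerOk x l = true ↔ ∀ p ∈ l, ¬ (p * p ≤ x ∧ p ∣ x) := by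
  induction l with
  | nil => simp [innerOk]
  | cons p rest ih =>
      show (if decide (p * p ≤ x) && (PySem.Int.mod x p == 0) then false else innerOk x rest)
          = true ↔ _
      by_cases h : p * p ≤ x ∧ PySem.Int.mod x p = 0
      · rw [if_pos (by simp [h.1, h.2])]
        simp only [Bool.false_eq_true, false_iff]
        intro hall
        exact hall p (List.mem_cons_self)
          ⟨h.1, (PySem.Int.mod_eq_zero_iff_dvd x p).mp h.2⟩
      · have hno : ¬ (p * p ≤ x ∧ p ∣ x) := by
          intro hc
          exact h ⟨hc.1, (PySem.Int.mod_eq_zero_iff_dvd x p).mpr hc.2⟩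
        rw [if_neg (by
          simp only [Bool.and_eq_true, decide_eq_true_eq, beq_iff_eq]
          exact fun hc => h hc), ih]
        constructor
        · intro hall q hq
          rcases List.mem_cons.mp hq with rfl | hq
          · exact hno
          · exact hall q hq
        · intro hall q hq
          exact hall q (List.mem_cons_of_mem _ hq)

-- the prime-table trial test decides primality for 2 ≤ x ≤ m, r = isqrt m
theorem innerOk_eq_prime (m x : Int) (hm : 2 ≤ m) (hx2 : 2 ≤ x) (hxm : x ≤ m) :
    (innerOk x ((PySem.List.pyRange 0 ((Nat.sqrt m.toNat : Int) + 1) 1).filter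
        (fun q => (sieveLoop (Nat.sqrt m.toNat : Int) 2 (by omega)
          (((PySem.List.pyRange 0 ((Nat.sqrt m.toNat : Int) + 1) 1).map
            (fun y => decide (2 ≤ y))).toArray)).getD q.toNat false)) = true)
      ↔ Nat.Prime x.toNat := by
  set r : Int := (Nat.sqrt m.toNat : Int) with hrdef
  have hr0 : 0 ≤ r := by positivity
  have hxk : ((x.toNat : Int)) = x := Int.toNat_of_nonneg (by omega)
  rw [innerOk_eq_true_iff]
  constructor
  · intro hall
    by_contra hnp
    set p := x.toNat.minFac with hpdef
    have hp : p.Prime := Nat.minFac_prime (by omega)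
    have hpd : p ∣ x.toNat := Nat.minFac_dvd _
    have hsq : p ^ 2 ≤ x.toNat := Nat.minFac_sq_le_self (by omega) hnp
    have hpm : p * p ≤ m.toNat := by
      have : x.toNat ≤ m.toNat := by omega
      nlinarith [hsq]
    have hpr : p ≤ Nat.sqrt m.toNat := Nat.le_sqrt.mpr (by nlinarith [hpm])
    have hmem : (p : Int) ∈ (PySem.List.pyRange 0 (r + 1) 1).filter
        (fun q => (sieveLoop r 2 (by omega)
          (((PySem.List.pyRange 0 (r + 1) 1).map (fun y => decide (2 ≤ y))).toArray)).getD
          q.toNat false) := by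
      rw [mem_primes r (p : Int) hr0]
      refine ⟨by exact_mod_cast hp.two_le, ?_, by simpa using hp⟩
      rw [hrdef]; exact_mod_cast hpr
    refine hall (p : Int) hmem ⟨?_, ?_⟩
    · rw [show ((p:Int)*(p:Int)) = ((p^2 : Nat) : Int) by push_cast; ring]
      omega
    · have h1 : ((p : Int)) ∣ ((x.toNat : Int)) := Int.natCast_dvd_natCast.mpr hpd
      rwa [hxk] at h1
  · intro hp q hq hc
    rw [mem_primes r q hr0] at hq
    obtain ⟨hq2, hqr, hqp⟩ := hq
    obtain ⟨hsq, hdvd⟩ := hc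
    have hdn : q.toNat ∣ x.toNat := by
      have h1 : ((q.toNat : Int)) ∣ ((x.toNat : Int)) := by
        rw [Int.toNat_of_nonneg (by omega : (0:Int) ≤ q), hxk]
        exact hdvd
      exact_mod_cast h1
    rcases hp.eq_one_or_self_of_dvd q.toNat hdn with h1 | h2
    · omega
    · have hqx : q = x := by omega
      nlinarith

theorem foldl_if2_add (P Q : Int → Prop) [DecidablePred P] [DecidablePred Q]
    (l : List Int) (a : Int) :
    l.foldl (fun t x => if P x then (if Q x then t + 2 else t) else t) a
      = a + (l.map (fun x => if P x ∧ Q x then (2 : Int) else 0)).sum := by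
  induction l generalizing a with
  | nil => simp
  | cons x rest ih =>
      simp only [List.foldl_cons, List.map_cons, List.sum_cons, ih]
      by_cases hp : P x
      · by_cases hq : Q x
        · simp [hp, hq]; ring
        · simp [hp, hq]
      · simp [hp]

-- ===== VERDICT (by name: the statement is the Claim_ definition above) =====
theorem score_prime_spec : Claim_equal_score_prime := by
  intro lst _
  show score_prime lst = score_prime_alt lst
  unfold score_prime score_prime_alt
  by_cases hnil : lst = []
  · simp [hnil]
  · rw [if_neg hnil]
    obtain ⟨m, hm⟩ : ∃ m, PySem.List.max? lst (fun y => y) = some m := by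
      rcases h : PySem.List.max? lst (fun y => y) with _ | m
      · exact absurd ((PySem.List.max?_eq_none_iff _ _).mp h) hnil
      · exact ⟨m, rfl⟩
    have hmax : ∀ y ∈ lst, y ≤ m := fun y hy => PySem.List.max?_isMax hm y hy
    rw [hm]
    simp only [Option.getD_some]
    by_cases hm2 : m < 2
    · rw [if_pos hm2]
      have hz : ∀ x ∈ lst, (if isPrimeA x then (2 : Int) else 0) = 0 := by
        intro x hx
        have : x < 2 := lt_of_le_of_lt (hmax x hx) hm2
        simp [isPrimeA, this]
      rw [List.map_congr_left hz]
      simp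
    · rw [if_neg hm2]
      push_neg at hm2
      refine Eq.symm ((foldl_if2_add _ _ lst 0).trans ?_)
      rw [zero_add]
      refine congrArg List.sum (List.map_congr_left ?_)
      intro x hx
      by_cases hx2 : 2 ≤ x
      · have hsv := innerOk_eq_prime m x hm2 hx2 (hmax x hx)
        have hpa := isPrimeA_eq_true_iff x hx2
        by_cases hp : Nat.Prime x.toNat
        · rw [if_pos ⟨hx2, hsv.mpr hp⟩, if_pos (hpa.mpr hp)]
        · rw [if_neg (fun hc => hp (hsv.mp hc.2)), if_neg (by rw [hpa]; exact hp)]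
      · rw [if_neg (fun hc => hx2 hc.1), if_neg (by simp [isPrimeA]; omega)]
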